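-- pv_equiv track=rewrite | github.com/ariedaze/CodingTest | 김순석/프로그래머스/pro_뉴스클러스터링.py | multiset
-- ===== SOURCE A (Python) =====
-- def multiset(A, B):
--     a1 = A.copy()
--     a2 = A.copy()
--     comm = []
--
--     for i in B:
--         if i not in a1:
--             a2.append(i)
--         else:
--             a1.remove(i)
--     for j in B:
--         if j in A:
--             A.remove(j)
--             comm.append(j)
--     return comm, a2
-- ===== SOURCE B (Python) =====
-- def multiset(A, B):
--     # Single fused pass over B: A is mutated in place (same removals A's
--     # second loop performs), comm and the union-extras collected together.
--     a2 = A.copy()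
--     comm = []
--     for x in B:
--         if x in A:
--             A.remove(x)
--             comm.append(x)
--         else:
--             a2.append(x)
--     return comm, a2
-- ===== Notes on version B (the rewrite author's own statement) =====
-- stated objective: simpler
-- what changed: Fuses A's two independent passes over B (one tracking matches in a throwaway copy a1, one in A itself) into a single pass that maintains A, comm and a2 together, since both passes make identical match decisions.
import Mathlib
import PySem

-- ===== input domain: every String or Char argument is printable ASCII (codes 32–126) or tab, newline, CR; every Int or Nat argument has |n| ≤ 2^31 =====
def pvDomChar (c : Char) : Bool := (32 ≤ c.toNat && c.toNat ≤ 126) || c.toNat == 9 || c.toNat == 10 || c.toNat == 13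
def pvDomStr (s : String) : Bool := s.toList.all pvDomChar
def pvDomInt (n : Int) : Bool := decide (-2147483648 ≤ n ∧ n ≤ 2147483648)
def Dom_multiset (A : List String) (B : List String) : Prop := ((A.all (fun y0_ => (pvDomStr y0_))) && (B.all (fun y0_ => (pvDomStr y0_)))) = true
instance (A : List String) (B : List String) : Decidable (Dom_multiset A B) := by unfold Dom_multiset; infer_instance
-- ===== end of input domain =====

-- B fuses A's two independent passes over B into one pass maintaining (A, a2, comm)
-- together (objective: simpler). Both Pythons mutate the argument A identically;
-- the equivalence proved here is about the return value.

-- ===== PORT A =====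
-- first loop: state (a1, a2); 'i not in a1' then append to a2, else a1.remove(i)
def multisetStep1 (st : List String × List String) (i : String) : List String × List String :=
  if !(st.1.contains i) then (st.1, st.2 ++ [i])
  else ((PySem.List.remove? st.1 i).getD st.1, st.2)

-- second loop: state (a, comm); 'j in A' then A.remove(j); comm.append(j)
def multisetStep2 (st : List String × List String) (j : String) : List String × List String :=
  if st.1.contains j then ((PySem.List.remove? st.1 j).getD st.1, st.2 ++ [j])
  else st

def multiset (A : List String) (B : List String) : List String × List String :=
  let s1 := B.foldl multisetStep1 (A, A)      -- a1 = A.copy(); a2 = A.copy()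
  let s2 := B.foldl multisetStep2 (A, ([] : List String))
  (s2.2, s1.2)

-- ===== PORT B =====
-- single fused pass: state (a, a2, comm)
def multisetAltStep (st : List String × List String × List String) (x : String) :
    List String × List String × List String :=
  if st.1.contains x then
    ((PySem.List.remove? st.1 x).getD st.1, st.2.1, st.2.2 ++ [x])
  else
    (st.1, st.2.1 ++ [x], st.2.2)

def multiset_alt (A : List String) (B : List String) : List String × List String :=
  let s := B.foldl multisetAltStep (A, A, ([] : List String))
  (s.2.2, s.2.1)

-- ===== PRECONDITION & SPEC =====
def Spec_multiset (A : List String) (B : List String) (out : List String × List String) : Prop := out = multiset_alt A B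
instance (A : List String) (B : List String) (out : List String × List String) : Decidable (Spec_multiset A B out) := by unfold Spec_multiset; infer_instance

-- ===== CLAIM (what is proved, stated in full; the proofs are below) =====
def Claim_equal_multiset : Prop := ∀ (A : List String) (B : List String), Dom_multiset A B → Spec_multiset A B (multiset A B)

-- ===== LEMMAS AND PROOFS =====
-- The fused loop is the two separate loops run in lockstep: both loops start from
-- the same list A and make the same membership decisions on the same evolving list.
theorem multiset_fuse (B : List String) (a a2 comm : List String) :
    B.foldl multisetAltStep (a, a2, comm) =
      ((B.foldl multisetStep2 (a, comm)).1,
       (B.foldl multisetStep1 (a, a2)).2,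
       (B.foldl multisetStep2 (a, comm)).2) := by
  induction B generalizing a a2 comm with
  | nil => rfl
  | cons x xs ih =>
      simp only [List.foldl_cons, multisetAltStep, multisetStep1, multisetStep2]
      by_cases h : x ∈ a <;> simp [h, ih]

-- ===== VERDICT (by name: the statement is the Claim_ definition above) =====
theorem multiset_spec : Claim_equal_multiset := by
  intro A B _
  show multiset A B = multiset_alt A B
  simp [multiset, multiset_alt, multiset_fuse]
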